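-- pv_equiv track=rewrite | github.com/Daniel-Higgins/tix-tracker-api | app/scrapers/base.py | infer_section_group
-- ===== SOURCE A (Python) =====
-- def infer_section_group(section: str) -> str:
--     section_lower = section.lower()
--
--     if any(term in section_lower for term in ["field", "dugout"]):
--         return "Field Level"
--     if "club" in section_lower:
--         return "Club Level"
--     if any(term in section_lower for term in ["lower", "main level", "box"]):
--         return "Lower Bowl"
--     if any(term in section_lower for term in ["bleacher", "pavilion", "outfield"]):
--         return "Outfield"
--     if any(term in section_lower for term in ["upper", "top deck", "reserve", "deck"]):
--         return "Upper Deck"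
--
--     return "General"
-- ===== SOURCE B (Python) =====
-- _LABELS = ["Field Level", "Club Level", "Lower Bowl", "Outfield", "Upper Deck"]
--
-- _KEYWORDS = [
--     ("field", 0), ("dugout", 0),
--     ("club", 1),
--     ("lower", 2), ("main level", 2), ("box", 2),
--     ("bleacher", 3), ("pavilion", 3), ("outfield", 3),
--     ("upper", 4), ("top deck", 4), ("reserve", 4), ("deck", 4),
-- ]
--
-- def infer_section_group(section: str) -> str:
--     # Single left-to-right scan: at each position record the best (lowest)
--     # priority of any keyword starting there; map the best priority to its label.
--     s = section.lower()
--     best = 5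
--     for i in range(len(s)):
--         for kw, pri in _KEYWORDS:
--             if pri < best and s.startswith(kw, i):
--                 best = pri
--     return _LABELS[best] if best < 5 else "General"
-- ===== Notes on version B (the rewrite author's own statement) =====
-- stated objective: alternative
-- what changed: Instead of five sequential whole-string substring tests, B runs a single left-to-right multi-pattern scan of the lowered string, recording at each position the minimum priority of any keyword starting there, and maps the final minimum priority to its label.
import Mathlib
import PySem

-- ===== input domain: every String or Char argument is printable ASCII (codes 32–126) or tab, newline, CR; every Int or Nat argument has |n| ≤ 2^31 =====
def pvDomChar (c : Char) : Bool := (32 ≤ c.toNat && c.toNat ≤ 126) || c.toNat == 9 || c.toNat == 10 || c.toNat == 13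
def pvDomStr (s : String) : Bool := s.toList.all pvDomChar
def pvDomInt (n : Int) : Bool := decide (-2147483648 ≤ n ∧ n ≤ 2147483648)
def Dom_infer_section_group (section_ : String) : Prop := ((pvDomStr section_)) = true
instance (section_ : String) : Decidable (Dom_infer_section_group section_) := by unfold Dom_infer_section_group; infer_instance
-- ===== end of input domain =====

-- B replaces A's five sequential whole-string substring tests by one left-to-right
-- multi-pattern scan that keeps the minimum priority of any keyword starting at each
-- position, then maps that priority to its label (alternative algorithm, same cost).


-- ===== PORT A =====
def infer_section_group (section_ : String) : String :=
  let section_lower := PySem.Str.lower section_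
  if ["field", "dugout"].any (fun term => PySem.Str.isIn term section_lower) then "Field Level"
  else if PySem.Str.isIn "club" section_lower then "Club Level"
  else if ["lower", "main level", "box"].any (fun term => PySem.Str.isIn term section_lower) then "Lower Bowl"
  else if ["bleacher", "pavilion", "outfield"].any (fun term => PySem.Str.isIn term section_lower) then "Outfield"
  else if ["upper", "top deck", "reserve", "deck"].any (fun term => PySem.Str.isIn term section_lower) then "Upper Deck"
  else "General"

-- ===== PORT B =====
def pvLabels : List String := ["Field Level", "Club Level", "Lower Bowl", "Outfield", "Upper Deck"]

def pvKeywords : List (List Char × Nat) :=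
  [ ("field".toList, 0), ("dugout".toList, 0),
    ("club".toList, 1),
    ("lower".toList, 2), ("main level".toList, 2), ("box".toList, 2),
    ("bleacher".toList, 3), ("pavilion".toList, 3), ("outfield".toList, 3),
    ("upper".toList, 4), ("top deck".toList, 4), ("reserve".toList, 4), ("deck".toList, 4) ]

-- the inner keyword loop at one position (suffix `suf` of the lowered string)
def pvStep (suf : List Char) (best : Nat) : Nat :=
  pvKeywords.foldl (fun b kp => if kp.2 < b ∧ PySem.Chars.startswith suf kp.1 = true then kp.2 else b) best

-- the outer position loop: one pass over the suffixes of the lowered string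
def pvScan : List Char → Nat → Nat
  | [], best => best
  | c :: rest, best => pvScan rest (pvStep (c :: rest) best)

def infer_section_group_alt (section_ : String) : String :=
  let s := (PySem.Str.lower section_).toList
  let best := pvScan s 5
  if best < 5 then pvLabels.getD best "General" else "General"

-- ===== PRECONDITION & SPEC =====
def Spec_infer_section_group (section_ : String) (out : String) : Prop := out = infer_section_group_alt section_
instance (section_ : String) (out : String) : Decidable (Spec_infer_section_group section_ out) := by unfold Spec_infer_section_group; infer_instance

-- ===== CLAIM (what is proved, stated in full; the proofs are below) =====
def Claim_equal_infer_section_group : Prop := ∀ (section_ : String), Dom_infer_section_group section_ → Spec_infer_section_group section_ (infer_section_group section_)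

-- ===== LEMMAS AND PROOFS =====

theorem pvFoldl_le (suf : List Char) : ∀ (K : List (List Char × Nat)) (b : Nat),
    K.foldl (fun b kp => if kp.2 < b ∧ PySem.Chars.startswith suf kp.1 = true then kp.2 else b) b ≤ b := by
  intro K
  induction K with
  | nil => intro b; simp
  | cons x K ih =>
      intro b
      simp only [List.foldl_cons]
      refine le_trans (ih _) ?_
      split <;> omega

theorem pvFoldl_complete (suf : List Char) : ∀ (K : List (List Char × Nat)) (b : Nat)
    (kw : List Char) (p : Nat), (kw, p) ∈ K → kw <+: suf →
    K.foldl (fun b kp => if kp.2 < b ∧ PySem.Chars.startswith suf kp.1 = true then kp.2 else b) b ≤ p := by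
  intro K
  induction K with
  | nil => intro b kw p hm; simp at hm
  | cons x K ih =>
      intro b kw p hm hpre
      rcases List.mem_cons.mp hm with he | ht
      · subst he
        simp only [List.foldl_cons]
        refine le_trans (pvFoldl_le suf K _) ?_
        have hsw : PySem.Chars.startswith suf kw = true := (PySem.Chars.startswith_iff suf kw).mpr hpre
        simp only [hsw, eq_self_iff_true, and_true]
        split <;> omega
      · exact ih _ kw p ht hpre

theorem pvFoldl_sound (suf : List Char) : ∀ (K : List (List Char × Nat)) (b : Nat),
    K.foldl (fun b kp => if kp.2 < b ∧ PySem.Chars.startswith suf kp.1 = true then kp.2 else b) b = b ∨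
    ∃ kw p, (kw, p) ∈ K ∧ kw <+: suf ∧
      K.foldl (fun b kp => if kp.2 < b ∧ PySem.Chars.startswith suf kp.1 = true then kp.2 else b) b = p := by
  intro K
  induction K with
  | nil => intro b; left; rfl
  | cons x K ih =>
      intro b
      simp only [List.foldl_cons]
      rcases ih (if x.2 < b ∧ PySem.Chars.startswith suf x.1 = true then x.2 else b) with h | ⟨kw, p, hm, hpre, he⟩
      · rw [h]
        by_cases hc : x.2 < b ∧ PySem.Chars.startswith suf x.1 = true
        · right
          exact ⟨x.1, x.2, List.mem_cons_self, (PySem.Chars.startswith_iff suf x.1).mp hc.2, by simp [hc]⟩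
        · left; simp [hc]
      · right; exact ⟨kw, p, List.mem_cons_of_mem _ hm, hpre, he⟩

theorem pvStep_le (suf : List Char) (b : Nat) : pvStep suf b ≤ b :=
  pvFoldl_le suf pvKeywords b

theorem pvStep_complete (suf : List Char) (b : Nat) (kw : List Char) (p : Nat)
    (hm : (kw, p) ∈ pvKeywords) (hpre : kw <+: suf) : pvStep suf b ≤ p :=
  pvFoldl_complete suf pvKeywords b kw p hm hpre

theorem pvStep_sound (suf : List Char) (b : Nat) :
    pvStep suf b = b ∨ ∃ kw p, (kw, p) ∈ pvKeywords ∧ kw <+: suf ∧ pvStep suf b = p :=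
  pvFoldl_sound suf pvKeywords b

theorem pvScan_le : ∀ (l : List Char) (b : Nat), pvScan l b ≤ b := by
  intro l
  induction l with
  | nil => intro b; simp [pvScan]
  | cons c rest ih =>
      intro b
      exact le_trans (ih (pvStep (c :: rest) b)) (pvStep_le (c :: rest) b)

theorem pvScan_complete : ∀ (l : List Char) (b : Nat) (kw : List Char) (p : Nat),
    (kw, p) ∈ pvKeywords → kw ≠ [] → kw <:+: l → pvScan l b ≤ p := by
  intro l
  induction l with
  | nil =>
      intro b kw p _ hne hinf
      exact absurd (List.eq_nil_of_infix_nil hinf) hne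
  | cons c rest ih =>
      intro b kw p hm hne hinf
      rcases List.infix_cons_iff.mp hinf with hpre | hinf'
      · show pvScan rest (pvStep (c :: rest) b) ≤ p
        exact le_trans (pvScan_le rest (pvStep (c :: rest) b)) (pvStep_complete (c :: rest) b kw p hm hpre)
      · exact ih _ kw p hm hne hinf'

theorem pvScan_sound : ∀ (l : List Char) (b : Nat),
    pvScan l b = b ∨ ∃ kw p, (kw, p) ∈ pvKeywords ∧ kw <:+: l ∧ pvScan l b = p := by
  intro l
  induction l with
  | nil => intro b; left; rfl
  | cons c rest ih =>
      intro b
      rcases ih (pvStep (c :: rest) b) with h | ⟨kw, p, hm, hinf, he⟩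
      · rcases pvStep_sound (c :: rest) b with h2 | ⟨kw, p, hm, hpre, he⟩
        · left; show pvScan rest (pvStep (c :: rest) b) = b
          rw [h]; exact h2
        · right
          exact ⟨kw, p, hm, hpre.isInfix, by show pvScan rest (pvStep (c :: rest) b) = p; rw [h]; exact he⟩
      · right; exact ⟨kw, p, hm, List.infix_cons hinf, he⟩


theorem pvKey_elim (kw : List Char) (p : Nat) (hm : (kw, p) ∈ pvKeywords) :
    (kw = "field".toList ∧ p = 0) ∨ (kw = "dugout".toList ∧ p = 0) ∨
    (kw = "club".toList ∧ p = 1) ∨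
    (kw = "lower".toList ∧ p = 2) ∨ (kw = "main level".toList ∧ p = 2) ∨ (kw = "box".toList ∧ p = 2) ∨
    (kw = "bleacher".toList ∧ p = 3) ∨ (kw = "pavilion".toList ∧ p = 3) ∨ (kw = "outfield".toList ∧ p = 3) ∨
    (kw = "upper".toList ∧ p = 4) ∨ (kw = "top deck".toList ∧ p = 4) ∨ (kw = "reserve".toList ∧ p = 4) ∨
    (kw = "deck".toList ∧ p = 4) := by
  simpa [pvKeywords, Prod.ext_iff] using hm

theorem pvScan_ge (L : List Char) (k : Nat) (hk : k ≤ 5)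
    (h : ∀ kw p, (kw, p) ∈ pvKeywords → p < k → ¬ kw <:+: L) : k ≤ pvScan L 5 := by
  rcases pvScan_sound L 5 with he | ⟨kw, p, hm, hinf, he⟩
  · omega
  · rw [he]
    by_contra hlt
    push_neg at hlt
    exact h kw p hm hlt hinf

-- ===== VERDICT (by name: the statement is the Claim_ definition above) =====
set_option maxHeartbeats 2000000 in
theorem infer_section_group_spec : Claim_equal_infer_section_group := by
  intro s _
  unfold Spec_infer_section_group infer_section_group infer_section_group_alt
  set L := (PySem.Str.lower s).toList with hL
  have hchar : ∀ t : String, PySem.Str.isIn t (PySem.Str.lower s) = true ↔ t.toList <:+: L := by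
    intro t; rw [hL]; exact PySem.Str.isIn_iff_infix t (PySem.Str.lower s)
  have hcompl : ∀ (kw : List Char) (p : Nat), (kw, p) ∈ pvKeywords → kw ≠ [] → kw <:+: L → pvScan L 5 ≤ p :=
    fun kw p => pvScan_complete L 5 kw p
  have hT : ∀ t : String, t.toList <:+: L → PySem.Str.isIn t (PySem.Str.lower s) = true :=
    fun t h => (hchar t).mpr h
  have hF : ∀ t : String, ¬ t.toList <:+: L → PySem.Str.isIn t (PySem.Str.lower s) = false :=
    fun t h => Bool.eq_false_iff.mpr (fun hh => h ((hchar t).mp hh))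
  simp only [List.any_cons, List.any_nil, Bool.or_false]
  by_cases g1 : "field".toList <:+: L ∨ "dugout".toList <:+: L
  · have hsc : pvScan L 5 = 0 := by
      have h := g1.elim (fun h => hcompl "field".toList 0 (by decide) (by decide) h)
                        (fun h => hcompl "dugout".toList 0 (by decide) (by decide) h)
      omega
    rcases g1 with h | h <;> simp only [hT _ h, hsc, Bool.true_or, Bool.or_true, Bool.false_or, Bool.or_false, reduceIte, List.getD_cons_zero, List.getD_cons_succ, pvLabels] <;> decide
  · push_neg at g1
    by_cases g2 : "club".toList <:+: L
    · have hlow : ∀ kw p, (kw, p) ∈ pvKeywords → p < 1 → ¬ kw <:+: L := by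
        intro kw p hm hp hinf
        rcases pvKey_elim kw p hm with ⟨h,h'⟩|⟨h,h'⟩|⟨h,h'⟩|⟨h,h'⟩|⟨h,h'⟩|⟨h,h'⟩|⟨h,h'⟩|⟨h,h'⟩|⟨h,h'⟩|⟨h,h'⟩|⟨h,h'⟩|⟨h,h'⟩|⟨h,h'⟩
        · subst h; exact g1.1 hinf
        · subst h; exact g1.2 hinf
        · omega
        · omega
        · omega
        · omega
        · omega
        · omega
        · omega
        · omega
        · omega
        · omega
        · omega
      have hsc : pvScan L 5 = 1 := by
        have h1 := hcompl "club".toList 1 (by decide) (by decide) g2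
        have h2 := pvScan_ge L 1 (by omega) hlow
        omega
      simp only [hF _ g1.1, hF _ g1.2, hT _ g2, hsc, Bool.true_or, Bool.or_true, Bool.false_or, Bool.or_false, reduceIte, List.getD_cons_zero, List.getD_cons_succ, pvLabels] <;> decide
    · by_cases g3 : "lower".toList <:+: L ∨ "main level".toList <:+: L ∨ "box".toList <:+: L
      · have hlow : ∀ kw p, (kw, p) ∈ pvKeywords → p < 2 → ¬ kw <:+: L := by
          intro kw p hm hp hinf
          rcases pvKey_elim kw p hm with ⟨h,h'⟩|⟨h,h'⟩|⟨h,h'⟩|⟨h,h'⟩|⟨h,h'⟩|⟨h,h'⟩|⟨h,h'⟩|⟨h,h'⟩|⟨h,h'⟩|⟨h,h'⟩|⟨h,h'⟩|⟨h,h'⟩|⟨h,h'⟩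
          · subst h; exact g1.1 hinf
          · subst h; exact g1.2 hinf
          · subst h; exact g2 hinf
          · omega
          · omega
          · omega
          · omega
          · omega
          · omega
          · omega
          · omega
          · omega
          · omega
        have hsc : pvScan L 5 = 2 := by
          have h1 := g3.elim (fun h => hcompl "lower".toList 2 (by decide) (by decide) h)
            (fun h => h.elim (fun h => hcompl "main level".toList 2 (by decide) (by decide) h)
                             (fun h => hcompl "box".toList 2 (by decide) (by decide) h))
          have h2 := pvScan_ge L 2 (by omega) hlow
          omega
        rcases g3 with h | h | h <;>
          simp only [hF _ g1.1, hF _ g1.2, hF _ g2, hT _ h, hsc, Bool.true_or, Bool.or_true, Bool.false_or, Bool.or_false, reduceIte, List.getD_cons_zero, List.getD_cons_succ, pvLabels] <;> decide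
      · push_neg at g3
        obtain ⟨g3a, g3b, g3c⟩ := g3
        by_cases g4 : "bleacher".toList <:+: L ∨ "pavilion".toList <:+: L ∨ "outfield".toList <:+: L
        · have hlow : ∀ kw p, (kw, p) ∈ pvKeywords → p < 3 → ¬ kw <:+: L := by
            intro kw p hm hp hinf
            rcases pvKey_elim kw p hm with ⟨h,h'⟩|⟨h,h'⟩|⟨h,h'⟩|⟨h,h'⟩|⟨h,h'⟩|⟨h,h'⟩|⟨h,h'⟩|⟨h,h'⟩|⟨h,h'⟩|⟨h,h'⟩|⟨h,h'⟩|⟨h,h'⟩|⟨h,h'⟩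
            · subst h; exact g1.1 hinf
            · subst h; exact g1.2 hinf
            · subst h; exact g2 hinf
            · subst h; exact g3a hinf
            · subst h; exact g3b hinf
            · subst h; exact g3c hinf
            · omega
            · omega
            · omega
            · omega
            · omega
            · omega
            · omega
          have hsc : pvScan L 5 = 3 := by
            have h1 := g4.elim (fun h => hcompl "bleacher".toList 3 (by decide) (by decide) h)
              (fun h => h.elim (fun h => hcompl "pavilion".toList 3 (by decide) (by decide) h)
                               (fun h => hcompl "outfield".toList 3 (by decide) (by decide) h))
            have h2 := pvScan_ge L 3 (by omega) hlow
            omega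
          rcases g4 with h | h | h <;>
            simp only [hF _ g1.1, hF _ g1.2, hF _ g2, hF _ g3a, hF _ g3b, hF _ g3c, hT _ h, hsc, Bool.true_or, Bool.or_true, Bool.false_or, Bool.or_false, reduceIte, List.getD_cons_zero, List.getD_cons_succ, pvLabels] <;> decide
        · push_neg at g4
          obtain ⟨g4a, g4b, g4c⟩ := g4
          by_cases g5 : "upper".toList <:+: L ∨ "top deck".toList <:+: L ∨ "reserve".toList <:+: L ∨ "deck".toList <:+: L
          · have hlow : ∀ kw p, (kw, p) ∈ pvKeywords → p < 4 → ¬ kw <:+: L := by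
              intro kw p hm hp hinf
              rcases pvKey_elim kw p hm with ⟨h,h'⟩|⟨h,h'⟩|⟨h,h'⟩|⟨h,h'⟩|⟨h,h'⟩|⟨h,h'⟩|⟨h,h'⟩|⟨h,h'⟩|⟨h,h'⟩|⟨h,h'⟩|⟨h,h'⟩|⟨h,h'⟩|⟨h,h'⟩
              · subst h; exact g1.1 hinf
              · subst h; exact g1.2 hinf
              · subst h; exact g2 hinf
              · subst h; exact g3a hinf
              · subst h; exact g3b hinf
              · subst h; exact g3c hinf
              · subst h; exact g4a hinf
              · subst h; exact g4b hinf
              · subst h; exact g4c hinf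
              · omega
              · omega
              · omega
              · omega
            have hsc : pvScan L 5 = 4 := by
              have h1 := g5.elim (fun h => hcompl "upper".toList 4 (by decide) (by decide) h)
                (fun h => h.elim (fun h => hcompl "top deck".toList 4 (by decide) (by decide) h)
                  (fun h => h.elim (fun h => hcompl "reserve".toList 4 (by decide) (by decide) h)
                                   (fun h => hcompl "deck".toList 4 (by decide) (by decide) h)))
              have h2 := pvScan_ge L 4 (by omega) hlow
              omega
            rcases g5 with h | h | h | h <;>
              simp only [hF _ g1.1, hF _ g1.2, hF _ g2, hF _ g3a, hF _ g3b, hF _ g3c,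
                    hF _ g4a, hF _ g4b, hF _ g4c, hT _ h, hsc, Bool.true_or, Bool.or_true, Bool.false_or, Bool.or_false, reduceIte, List.getD_cons_zero, List.getD_cons_succ, pvLabels] <;> decide
          · push_neg at g5
            obtain ⟨g5a, g5b, g5c, g5d⟩ := g5
            have hlow : ∀ kw p, (kw, p) ∈ pvKeywords → p < 5 → ¬ kw <:+: L := by
              intro kw p hm hp hinf
              rcases pvKey_elim kw p hm with ⟨h,h'⟩|⟨h,h'⟩|⟨h,h'⟩|⟨h,h'⟩|⟨h,h'⟩|⟨h,h'⟩|⟨h,h'⟩|⟨h,h'⟩|⟨h,h'⟩|⟨h,h'⟩|⟨h,h'⟩|⟨h,h'⟩|⟨h,h'⟩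
              · subst h; exact g1.1 hinf
              · subst h; exact g1.2 hinf
              · subst h; exact g2 hinf
              · subst h; exact g3a hinf
              · subst h; exact g3b hinf
              · subst h; exact g3c hinf
              · subst h; exact g4a hinf
              · subst h; exact g4b hinf
              · subst h; exact g4c hinf
              · subst h; exact g5a hinf
              · subst h; exact g5b hinf
              · subst h; exact g5c hinf
              · subst h; exact g5d hinf
            have hsc : pvScan L 5 = 5 := by
              have h2 := pvScan_ge L 5 (by omega) hlow
              have h3 := pvScan_le L 5
              omega
            simp only [hF _ g1.1, hF _ g1.2, hF _ g2, hF _ g3a, hF _ g3b, hF _ g3c,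
                  hF _ g4a, hF _ g4b, hF _ g4c, hF _ g5a, hF _ g5b, hF _ g5c, hF _ g5d, hsc, Bool.true_or, Bool.or_true, Bool.false_or, Bool.or_false, reduceIte, List.getD_cons_zero, List.getD_cons_succ, pvLabels] <;> decide
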